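-- pv_equiv track=rewrite | github.com/pratikbhande/DocInsgihts | DocInsights/agents/pdf_agent.py | _retrieve_relevant_chunks
-- ===== SOURCE A (Python) =====
-- from typing import Dict, Any, List, Optional
--
-- def _retrieve_relevant_chunks(query: str, doc_chunks: List[str], num_chunks: int = 5) -> List[str]:
--     """
--     Retrieve the most relevant document chunks for a query.
--
--     Args:
--         query: The user's query string
--         doc_chunks: List of document chunks
--         num_chunks: Number of chunks to retrieve
--
--     Returns:
--         List of relevant document chunks
--     """
--     # If few chunks, return all
--     if len(doc_chunks) <= num_chunks:
--         return doc_chunks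
--
--     # Simple keyword-based relevance scoring
--     chunks_with_scores = []
--     query_terms = set(query.lower().split())
--
--     for chunk in doc_chunks:
--         chunk_lower = chunk.lower()
--         score = sum(1 for term in query_terms if term in chunk_lower)
--         chunks_with_scores.append((chunk, score))
--
--     # Sort by relevance score (descending)
--     chunks_with_scores.sort(key=lambda x: x[1], reverse=True)
--
--     # Get top chunks
--     top_chunks = [chunk for chunk, _ in chunks_with_scores[:num_chunks]]
--
--     # If no chunks matched, return some default chunks
--     if not top_chunks or all(score == 0 for _, score in chunks_with_scores[:num_chunks]):
--         return doc_chunks[:num_chunks]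
--
--     return top_chunks
-- ===== SOURCE B (Python) =====
-- def _retrieve_relevant_chunks(query, doc_chunks, num_chunks=5):
--     # If few chunks, return all
--     if len(doc_chunks) <= num_chunks:
--         return doc_chunks
--
--     query_terms = set(query.lower().split())
--
--     # Bucket (counting) sort: a chunk's score is in 0..len(query_terms)
--     buckets = [[] for _ in range(len(query_terms) + 1)]
--     for chunk in doc_chunks:
--         chunk_lower = chunk.lower()
--         score = sum(1 for term in query_terms if term in chunk_lower)
--         buckets[score].append(chunk)
--
--     # Highest score first; within a bucket the input order is kept
--     ranked = []
--     for score, bucket in reversed(list(enumerate(buckets))):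
--         for chunk in bucket:
--             ranked.append((chunk, score))
--
--     top = ranked[:num_chunks]
--     # scores are descending, so "all zero" == "first is zero"
--     if not top or top[0][1] == 0:
--         return doc_chunks[:num_chunks]
--     return [chunk for chunk, _ in top]
-- ===== Notes on version B (the rewrite author's own statement) =====
-- stated objective: alternative
-- what changed: B replaces A's stable comparison sort of (chunk, score) pairs by a counting/bucket sort: chunks are appended in input order to buckets indexed by score (0..len(query_terms)), the ranked list is the buckets read from highest score down, and the all-zero guard becomes a check of the first ranked score.
import Mathlib
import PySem

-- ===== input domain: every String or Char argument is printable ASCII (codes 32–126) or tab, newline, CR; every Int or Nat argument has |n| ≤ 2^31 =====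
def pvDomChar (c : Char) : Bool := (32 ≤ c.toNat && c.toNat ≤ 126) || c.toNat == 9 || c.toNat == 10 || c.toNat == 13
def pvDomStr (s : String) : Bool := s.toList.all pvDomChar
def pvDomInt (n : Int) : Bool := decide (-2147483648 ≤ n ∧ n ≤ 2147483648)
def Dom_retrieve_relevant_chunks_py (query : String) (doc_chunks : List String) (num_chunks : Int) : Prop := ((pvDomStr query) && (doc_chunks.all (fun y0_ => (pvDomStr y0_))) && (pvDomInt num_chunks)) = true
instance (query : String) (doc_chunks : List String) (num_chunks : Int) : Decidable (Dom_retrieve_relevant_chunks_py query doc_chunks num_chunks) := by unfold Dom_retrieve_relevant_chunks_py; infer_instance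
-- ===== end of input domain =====

-- B replaces A's stable comparison sort by a counting/bucket sort over scores 0..len(query_terms)
-- (same scores, same stable order, same top-k slice and zero-score guard); objective: alternative algorithm.

-- ===== PORT A =====
-- score = sum(1 for term in query_terms if term in chunk_lower)
def pvScoreA (terms : List String) (chunk_lower : String) : Int :=
  (terms.map (fun term => if PySem.Str.isIn term chunk_lower then (1 : Int) else 0)).sum

def retrieve_relevant_chunks_py (query : String) (doc_chunks : List String) (num_chunks : Int) : List String :=
  if (doc_chunks.length : Int) ≤ num_chunks then doc_chunks
  else
    let query_terms : PySem.Set String := PySem.Set.ofList (PySem.Str.split₀ (PySem.Str.lower query))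
    let chunks_with_scores : List (String × Int) :=
      doc_chunks.foldl (fun acc chunk => acc ++ [(chunk, pvScoreA query_terms (PySem.Str.lower chunk))]) []
    let sorted_cws := PySem.List.sorted chunks_with_scores (fun p => p.2) true
    let top_chunks := (PySem.List.slice sorted_cws none (some num_chunks)).map (fun p => p.1)
    if top_chunks = [] ∨ (PySem.List.slice sorted_cws none (some num_chunks)).all (fun p => p.2 == 0) then
      PySem.List.slice doc_chunks none (some num_chunks)
    else top_chunks

-- ===== PORT B =====
-- sum(1 for term in query_terms if term in chunk_lower) ported as countP (a count of hits)
def pvScoreB (terms : List String) (chunk_lower : String) : Nat :=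
  terms.countP (fun term => PySem.Str.isIn term chunk_lower)

-- buckets[score].append(chunk); score ≤ len(query_terms) < len(buckets), so set/getD are exact here
def pvBump (buckets : List (List String)) (s : Nat) (c : String) : List (List String) :=
  buckets.set s (buckets.getD s [] ++ [c])

def retrieve_relevant_chunks_py_alt (query : String) (doc_chunks : List String) (num_chunks : Int) : List String :=
  if (doc_chunks.length : Int) ≤ num_chunks then doc_chunks
  else
    let query_terms : PySem.Set String := PySem.Set.ofList (PySem.Str.split₀ (PySem.Str.lower query))
    let buckets : List (List String) :=
      doc_chunks.foldl
        (fun bs chunk => pvBump bs (pvScoreB query_terms (PySem.Str.lower chunk)) chunk)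
        (List.replicate (query_terms.length + 1) [])
    let ranked : List (String × Int) :=
      (PySem.List.enumerate buckets 0).reverse.foldl
        (fun acc sb => sb.2.foldl (fun acc2 c => acc2 ++ [(c, sb.1)]) acc) []
    let top := PySem.List.slice ranked none (some num_chunks)
    match top with
    | [] => PySem.List.slice doc_chunks none (some num_chunks)
    | p :: _ =>
        if p.2 == 0 then PySem.List.slice doc_chunks none (some num_chunks)
        else top.map (fun q => q.1)

-- ===== PRECONDITION & SPEC =====
def Spec_retrieve_relevant_chunks_py (query : String) (doc_chunks : List String) (num_chunks : Int) (out : List String) : Prop := out = retrieve_relevant_chunks_py_alt query doc_chunks num_chunks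
instance (query : String) (doc_chunks : List String) (num_chunks : Int) (out : List String) : Decidable (Spec_retrieve_relevant_chunks_py query doc_chunks num_chunks out) := by unfold Spec_retrieve_relevant_chunks_py; infer_instance

-- ===== CLAIM (what is proved, stated in full; the proofs are below) =====
def Claim_equal_retrieve_relevant_chunks_py : Prop := ∀ (query : String) (doc_chunks : List String) (num_chunks : Int), Dom_retrieve_relevant_chunks_py query doc_chunks num_chunks → Spec_retrieve_relevant_chunks_py query doc_chunks num_chunks (retrieve_relevant_chunks_py query doc_chunks num_chunks)

-- ===== LEMMAS AND PROOFS =====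

-- A's Int score is B's Nat score
theorem pvScoreA_eq (terms : List String) (c : String) :
    pvScoreA terms c = (pvScoreB terms c : Int) := by
  simpa [pvScoreA, pvScoreB] using
    PySem.List.sum_map_ite_one_zero (fun term => PySem.Str.isIn term c) terms

theorem pvScoreB_le (terms : List String) (c : String) :
    pvScoreB terms c ≤ terms.length := List.countP_le_length

-- the intended final bucket contents: bucket s = chunks whose score is s, in input order
def pvBucketsSpec (terms : List String) (T : Nat) (xs : List String) : List (List String) :=
  (List.range (T + 1)).map (fun (s : Nat) => xs.filter (fun c => pvScoreB terms (PySem.Str.lower c) == s))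

theorem pvBucketsSpec_nil (terms : List String) (T : Nat) :
    pvBucketsSpec terms T [] = List.replicate (T + 1) [] := by
  apply List.ext_getElem <;> simp [pvBucketsSpec]

theorem pvBump_spec (terms : List String) (T : Nat) (xs : List String) (c : String)
    (h : pvScoreB terms (PySem.Str.lower c) ≤ T) :
    pvBump (pvBucketsSpec terms T xs) (pvScoreB terms (PySem.Str.lower c)) c
      = pvBucketsSpec terms T (xs ++ [c]) := by
  have hlt : pvScoreB terms (PySem.Str.lower c) < T + 1 := Nat.lt_succ_of_le h
  apply List.ext_getElem
  · simp [pvBump, pvBucketsSpec]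
  · intro k hk1 hk2
    simp only [pvBump, pvBucketsSpec] at *
    rw [List.getElem_set]
    have hgetD : ((List.range (T + 1)).map
        (fun (s : Nat) => xs.filter (fun c' => pvScoreB terms (PySem.Str.lower c') == s))).getD
        (pvScoreB terms (PySem.Str.lower c)) []
        = xs.filter (fun c' => pvScoreB terms (PySem.Str.lower c') == pvScoreB terms (PySem.Str.lower c)) := by
      rw [List.getD_eq_getElem?_getD, List.getElem?_map, List.getElem?_range hlt]
      rfl
    by_cases hks : pvScoreB terms (PySem.Str.lower c) = k
    · rw [if_pos hks]
      subst hks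
      rw [hgetD]
      simp [List.filter_append]
    · rw [if_neg hks]
      have hne : ¬ (pvScoreB terms (PySem.Str.lower c) == (k : Nat)) = true := by
        simp [hks]
      simp [List.filter_append, hne]

theorem pvBuckets_fold (terms : List String) (T : Nat) (xs : List String)
    (hT : ∀ c ∈ xs, pvScoreB terms (PySem.Str.lower c) ≤ T) :
    xs.foldl (fun bs chunk => pvBump bs (pvScoreB terms (PySem.Str.lower chunk)) chunk)
        (List.replicate (T + 1) [])
      = pvBucketsSpec terms T xs := by
  induction xs using List.reverseRecOn with
  | nil => simp [pvBucketsSpec_nil]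
  | append_singleton xs c ih =>
      rw [List.foldl_append]
      have hxs : ∀ c' ∈ xs, pvScoreB terms (PySem.Str.lower c') ≤ T := by
        intro c' hc'; exact hT c' (List.mem_append_left _ hc')
      rw [ih hxs]
      simp only [List.foldl_cons, List.foldl_nil]
      exact pvBump_spec terms T xs c (hT c (by simp))

-- insertBy over a partition: skip a block where `before` is false, insert in front of a block where it is true
theorem pvInsertBy_append {α : Type} (before : α → α → Bool) (x : α) (P Q : List α)
    (hP : ∀ y ∈ P, before x y = false) (hQ : ∀ y ∈ Q, before x y = true) :
    PySem.List.insertBy before x (P ++ Q) = P ++ x :: Q := by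
  induction P with
  | nil =>
      cases Q with
      | nil => simp [PySem.List.insertBy]
      | cons q qs => simp [PySem.List.insertBy, hQ q (by simp)]
  | cons a P ih =>
      have ha : before x a = false := hP a (by simp)
      simp only [List.cons_append, PySem.List.insertBy, ha]
      simp only [Bool.false_eq_true, if_false]
      rw [ih (fun y hy => hP y (by simp [hy])) ]

theorem pvInsertBy_append_left {α : Type} (before : α → α → Bool) (x : α) (P Q : List α)
    (hP : ∀ y ∈ P, before x y = false) :
    PySem.List.insertBy before x (P ++ Q) = P ++ PySem.List.insertBy before x Q := by
  induction P with
  | nil => rfl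
  | cons a P ih =>
      have ha : before x a = false := hP a (by simp)
      simp only [List.cons_append, PySem.List.insertBy, ha]
      simp only [Bool.false_eq_true, if_false]
      rw [ih (fun y hy => hP y (by simp [hy]))]

-- inserting x (score s₀ ∈ L) into the bucket concatenation appends it to its bucket
theorem pvInsert_flatMap {α : Type} (key : α → Int) (x : α) (L : List Nat) (s₀ : Nat)
    (hL : L.Pairwise (· > ·)) (hmem : s₀ ∈ L) (hkey : key x = (s₀ : Int)) (xs : List α) :
    PySem.List.insertBy (fun a b => decide (key b < key a)) x
        (L.flatMap (fun (s : Nat) => xs.filter (fun y => key y == (s : Int))))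
      = L.flatMap (fun (s : Nat) => (xs ++ [x]).filter (fun y => key y == (s : Int))) := by
  induction L with
  | nil => simp at hmem
  | cons s L ih =>
      have hpw := (List.pairwise_cons.mp hL).1
      have hLtail := (List.pairwise_cons.mp hL).2
      simp only [List.flatMap_cons]
      by_cases hs : s = s₀
      · subst hs
        -- x goes to the end of this (first) bucket
        have hfilter : (xs ++ [x]).filter (fun y => key y == (s : Int))
            = xs.filter (fun y => key y == (s : Int)) ++ [x] := by
          simp [List.filter_append, hkey]
        have htail : ∀ s' ∈ L, (xs ++ [x]).filter (fun y => key y == (s' : Int))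
            = xs.filter (fun y => key y == (s' : Int)) := by
          intro s' hs'
          have : s' < s := hpw s' hs'
          have : ((s' : Int)) ≠ (s : Int) := by exact_mod_cast Nat.ne_of_lt this
          simp [List.filter_append, hkey, this.symm]
        rw [pvInsertBy_append]
        · rw [hfilter, List.flatMap_congr htail]
          simp
        · intro y hy
          have : key y = (s : Int) := by
            have := List.of_mem_filter hy; simpa using this
          simp [this, hkey]
        · intro y hy
          rcases List.mem_flatMap.mp hy with ⟨s', hs', hy'⟩
          have hky : key y = (s' : Int) := by
            have := List.of_mem_filter hy'; simpa using this
          have : s' < s := hpw s' hs'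
          simp only [decide_eq_true_eq, hky, hkey]
          exact_mod_cast this
      · have hmem' : s₀ ∈ L := by
          rcases List.mem_cons.mp hmem with h | h
          · exact absurd h.symm hs
          · exact h
        have hgt : s₀ < s := hpw s₀ hmem'
        have hfilterhead : (xs ++ [x]).filter (fun y => key y == (s : Int))
            = xs.filter (fun y => key y == (s : Int)) := by
          have : ((s₀ : Int)) ≠ (s : Int) := by exact_mod_cast Nat.ne_of_lt hgt
          simp [List.filter_append, hkey, this]
        rw [pvInsertBy_append_left]
        · rw [hfilterhead, ih hLtail hmem']
        · intro y hy
          have hky : key y = (s : Int) := by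
            have := List.of_mem_filter hy; simpa using this
          simp only [hky, hkey, decide_eq_false_iff_not, not_lt]
          exact_mod_cast Nat.le_of_lt hgt

-- the stable reverse sort by a bounded Nat-valued key IS the descending bucket concatenation
theorem pvSorted_eq_buckets {α : Type} (key : α → Int) (T : Nat) (xs : List α)
    (h : ∀ x ∈ xs, ∃ s : Nat, s ≤ T ∧ key x = (s : Int)) :
    PySem.List.sorted xs key true
      = ((List.range (T + 1)).reverse).flatMap (fun (s : Nat) => xs.filter (fun y => key y == (s : Int))) := by
  rw [PySem.List.sorted_rev_eq_foldl_insertBy]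
  induction xs using List.reverseRecOn with
  | nil => simp
  | append_singleton xs x ih =>
      have hxs : ∀ y ∈ xs, ∃ s : Nat, s ≤ T ∧ key y = (s : Int) := by
        intro y hy; exact h y (List.mem_append_left _ hy)
      rw [List.foldl_append, ih hxs]
      simp only [List.foldl_cons, List.foldl_nil]
      rcases h x (by simp) with ⟨s₀, hs₀T, hkey⟩
      exact pvInsert_flatMap key x ((List.range (T + 1)).reverse) s₀
        (List.pairwise_reverse.mpr (by simpa using List.pairwise_lt_range))
        (by simp [Nat.lt_succ_of_le hs₀T]) hkey xs

-- slice from the start is a take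
theorem pvSlice_to_take {α : Type} (xs : List α) (b : Int) :
    PySem.List.slice xs none (some b) = xs.take (PySem.List.clampIdx xs.length b) := by
  simp [PySem.List.slice]

-- on a descending, nonnegative list of scores, "all zero" is "head is zero"
theorem pvAllZero_head (p : String × Int) (rest : List (String × Int))
    (hpw : (p :: rest).Pairwise (fun a b => b.2 ≤ a.2))
    (hnn : ∀ q ∈ p :: rest, 0 ≤ q.2) :
    ((p :: rest).all (fun q => q.2 == 0)) = (p.2 == 0) := by
  by_cases h : p.2 = 0
  · simp only [List.all_cons, h]
    have : ∀ q ∈ rest, (q.2 == 0) = true := by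
      intro q hq
      have h1 : q.2 ≤ p.2 := (List.pairwise_cons.mp hpw).1 q hq
      have h2 : 0 ≤ q.2 := hnn q (by simp [hq])
      simp only [beq_iff_eq]; omega
    simp [List.all_eq_true.mpr this]
  · simp [List.all_cons, h]

-- main equivalence
set_option maxHeartbeats 2000000 in
theorem pvMain (query : String) (doc_chunks : List String) (num_chunks : Int) :
    retrieve_relevant_chunks_py query doc_chunks num_chunks
      = retrieve_relevant_chunks_py_alt query doc_chunks num_chunks := by
  unfold retrieve_relevant_chunks_py retrieve_relevant_chunks_py_alt
  by_cases hlen : (doc_chunks.length : Int) ≤ num_chunks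
  · simp [hlen]
  · simp only [hlen, if_false]
    set terms := PySem.Set.ofList (PySem.Str.split₀ (PySem.Str.lower query)) with hterms
    set T := terms.length with hT
    -- A's pair list
    have hcws : doc_chunks.foldl
        (fun acc chunk => acc ++ [(chunk, pvScoreA terms (PySem.Str.lower chunk))]) []
        = doc_chunks.map (fun c => (c, (pvScoreB terms (PySem.Str.lower c) : Int))) := by
      rw [PySem.List.foldl_append_singleton_eq_map]
      simp [pvScoreA_eq]
    set cws := doc_chunks.map (fun c => (c, (pvScoreB terms (PySem.Str.lower c) : Int))) with hcwsdef
    -- B's buckets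
    have hbuckets := pvBuckets_fold terms T doc_chunks (fun c _ => pvScoreB_le terms _)
    -- B's ranked list, bucket by bucket
    have hranked :
        (PySem.List.enumerate (pvBucketsSpec terms T doc_chunks) 0).reverse.foldl
            (fun acc sb => sb.2.foldl (fun acc2 c => acc2 ++ [(c, sb.1)]) acc) []
          = ((List.range (T + 1)).reverse).flatMap
              (fun (s : Nat) => cws.filter (fun y => y.2 == (s : Int))) := by
      have henum : PySem.List.enumerate (pvBucketsSpec terms T doc_chunks) 0
          = (List.range (T + 1)).map
              (fun (s : Nat) => ((s : Int), doc_chunks.filter (fun c => pvScoreB terms (PySem.Str.lower c) == s))) := by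
        apply List.ext_getElem
        · simp [pvBucketsSpec, PySem.List.length_enumerate]
        · intro k hk1 hk2
          rw [PySem.List.getElem_enumerate]
          simp [pvBucketsSpec]
      rw [henum, ← List.map_reverse]
      have hstep : ∀ (acc : List (String × Int)) (L : List Nat),
          (L.map (fun (s : Nat) => ((s : Int), doc_chunks.filter (fun c => pvScoreB terms (PySem.Str.lower c) == s)))).foldl
              (fun acc sb => sb.2.foldl (fun acc2 c => acc2 ++ [(c, sb.1)]) acc) acc
            = acc ++ L.flatMap (fun (s : Nat) => cws.filter (fun y => y.2 == (s : Int))) := by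
        intro acc L
        induction L generalizing acc with
        | nil => simp
        | cons s L ihL =>
            simp only [List.map_cons, List.foldl_cons]
            rw [PySem.List.foldl_append_singleton_eq_map, ihL]
            have hbucket : cws.filter (fun y => y.2 == (s : Int))
                = (doc_chunks.filter (fun c => pvScoreB terms (PySem.Str.lower c) == s)).map
                    (fun c => (c, (s : Int))) := by
              rw [hcwsdef, List.filter_map]
              have hpred : ∀ c ∈ doc_chunks,
                  ((fun (y : String × Int) => y.2 == (s : Int)) ∘
                    (fun c => (c, (pvScoreB terms (PySem.Str.lower c) : Int)))) c
                    = (pvScoreB terms (PySem.Str.lower c) == s) := by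
                intro c _
                simp [Function.comp]
              rw [List.filter_congr hpred]
              apply List.map_congr_left
              intro c hc
              have hsc : pvScoreB terms (PySem.Str.lower c) = s := by
                simpa using List.of_mem_filter hc
              simp [hsc]
            rw [← hbucket]
            simp
      rw [hstep]
      simp
    -- A's sorted list equals B's ranked list
    have hsorted : PySem.List.sorted cws (fun p => p.2) true
        = ((List.range (T + 1)).reverse).flatMap (fun (s : Nat) => cws.filter (fun y => y.2 == (s : Int))) := by
      apply pvSorted_eq_buckets (fun p => p.2) T cws
      intro p hp
      rcases List.mem_map.mp hp with ⟨c, hc, rfl⟩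
      exact ⟨pvScoreB terms (PySem.Str.lower c), pvScoreB_le terms _, rfl⟩
    rw [hcws, hbuckets, hranked, hsorted]
    set R := ((List.range (T + 1)).reverse).flatMap (fun (s : Nat) => cws.filter (fun y => y.2 == (s : Int))) with hR
    -- the two guards agree on the common sliced list
    have hpwR : R.Pairwise (fun a b => b.2 ≤ a.2) := by
      rw [← hsorted]
      exact PySem.List.sorted_pairwise_rev cws (fun p => p.2)
    have hnnR : ∀ q ∈ R, 0 ≤ q.2 := by
      intro q hq
      rw [← hsorted] at hq
      rcases List.mem_map.mp ((PySem.List.mem_sorted cws (fun p => p.2) true q).mp hq) with ⟨c, hc, rfl⟩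
      positivity
    cases hslice : PySem.List.slice R none (some num_chunks) with
    | nil => simp
    | cons p rest =>
        have hpwslice : (p :: rest).Pairwise (fun a b => b.2 ≤ a.2) := by
          rw [← hslice, pvSlice_to_take]
          exact hpwR.sublist (List.take_sublist _ _)
        have hnnslice : ∀ q ∈ p :: rest, 0 ≤ q.2 := by
          intro q hq
          exact hnnR q (PySem.List.mem_of_mem_slice R none (some num_chunks) (hslice ▸ hq))
        rw [pvAllZero_head p rest hpwslice hnnslice]
        by_cases hz : p.2 = 0
        · simp [hz]
        · simp [hz]

-- ===== VERDICT (by name: the statement is the Claim_ definition above) =====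
theorem retrieve_relevant_chunks_py_spec : Claim_equal_retrieve_relevant_chunks_py := by
  intro query doc_chunks num_chunks _
  exact pvMain query doc_chunks num_chunks
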